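-- pv_equiv track=rewrite | github.com/dw425/etl-dep-viz | backend/app/engines/constellation_engine.py | _assign_orphans
-- ===== SOURCE A (Python) =====
-- def _assign_orphans(
--     all_ids: list[str],
--     communities: list[set[str]],
--     fingerprints: dict[str, frozenset],
-- ) -> list[set[str]]:
--     """Assign sessions not in any community to nearest community by table overlap."""
--     assigned = set()
--     for c in communities:
--         assigned.update(c)
--
--     orphans = [sid for sid in all_ids if sid not in assigned]
--     if not orphans:
--         return communities
--
--     comm_tables: list[frozenset] = []
--     for comm in communities:
--         tables: set[str] = set()
--         for sid in comm:
--             tables.update(fingerprints.get(sid, frozenset()))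
--         comm_tables.append(frozenset(tables))
--
--     for sid in orphans:
--         fp = fingerprints.get(sid, frozenset())
--         if not fp:
--             communities.append({sid})
--             comm_tables.append(fp)
--             continue
--
--         best_idx = -1
--         best_overlap = 0
--         for i, ct in enumerate(comm_tables):
--             overlap = len(fp & ct)
--             if overlap > best_overlap:
--                 best_overlap = overlap
--                 best_idx = i
--
--         if best_idx >= 0 and best_overlap > 0:
--             communities[best_idx].add(sid)
--             comm_tables[best_idx] = frozenset(
--                 set(comm_tables[best_idx]) | set(fp)
--             )
--         else:
--             communities.append({sid})
--             comm_tables.append(fp)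
--
--     return [c for c in communities if len(c) > 0]
-- ===== SOURCE B (Python) =====
-- def _assign_orphans(
--     all_ids: list[str],
--     communities: list[set[str]],
--     fingerprints: dict[str, frozenset],
-- ) -> list[set[str]]:
--     """Assign orphan sessions via an inverted index table -> community indices,
--     updated incrementally, instead of re-scanning every community per orphan."""
--     assigned = {sid for c in communities for sid in c}
--     orphans = [sid for sid in all_ids if sid not in assigned]
--     if not orphans:
--         return communities
--
--     index: dict[str, set[int]] = {}  # table -> indices of communities owning it
--     n = len(communities)
--     for i in range(n):
--         for sid in communities[i]:
--             for t in fingerprints.get(sid, ()):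
--                 index.setdefault(t, set()).add(i)
--
--     for sid in orphans:
--         fp = fingerprints.get(sid, frozenset())
--         best_idx = -1
--         best = 0
--         if fp:
--             counts: dict[int, int] = {}
--             for t in fp:
--                 for i in index.get(t, ()):
--                     counts[i] = counts.get(i, 0) + 1
--             for i in sorted(counts):  # ascending: first strict max = smallest argmax
--                 if counts[i] > best:
--                     best, best_idx = counts[i], i
--         if best_idx >= 0:
--             communities[best_idx].add(sid)
--             for t in fp:
--                 index.setdefault(t, set()).add(best_idx)
--         else:
--             communities.append({sid})
--             for t in fp:
--                 index.setdefault(t, set()).add(n)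
--             n += 1
--
--     return [c for c in communities if len(c) > 0]
-- ===== Notes on version B (the rewrite author's own statement) =====
-- stated objective: faster
-- what changed: Instead of recomputing, for every orphan, its table overlap with every community's full table set, B builds an inverted index table->set of community indices once, counts overlaps only over the communities that actually share a table with the orphan, picks the smallest index with maximal positive count, and updates the index incrementally.
import Mathlib
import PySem

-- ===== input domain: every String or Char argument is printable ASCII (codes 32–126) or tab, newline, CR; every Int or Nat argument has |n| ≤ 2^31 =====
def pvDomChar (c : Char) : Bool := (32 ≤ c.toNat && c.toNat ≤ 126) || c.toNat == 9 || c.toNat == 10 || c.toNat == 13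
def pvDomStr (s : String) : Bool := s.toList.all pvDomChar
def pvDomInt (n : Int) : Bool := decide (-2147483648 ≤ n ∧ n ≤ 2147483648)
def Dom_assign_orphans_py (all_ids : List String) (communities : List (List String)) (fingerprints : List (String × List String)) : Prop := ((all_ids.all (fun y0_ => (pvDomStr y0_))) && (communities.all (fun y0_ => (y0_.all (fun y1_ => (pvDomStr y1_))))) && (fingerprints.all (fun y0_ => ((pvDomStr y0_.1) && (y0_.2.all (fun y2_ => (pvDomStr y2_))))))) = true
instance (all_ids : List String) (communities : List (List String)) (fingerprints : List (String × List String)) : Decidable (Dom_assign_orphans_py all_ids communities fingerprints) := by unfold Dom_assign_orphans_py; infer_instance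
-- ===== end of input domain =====

-- B replaces A's per-orphan scan of every community's table set by an inverted index
-- table → community indices that is built once and updated incrementally (measured faster).
-- A mutates its `communities` argument in place; the equivalence proved here is about the
-- RETURN value only (B performs the analogous mutations in Python).

-- ===== PORT A =====
-- `fingerprints.get(sid, frozenset())` read at the dict boundary as its set of distinct tables
-- (a frozenset's elements are distinct); shared by both ports as the input-reading helper.
def fpSet (fingerprints : List (String × List String)) (sid : String) : List String :=
  PySem.Set.ofList ((PySem.Dict.mk fingerprints).getD sid [])

-- the body of A's `for sid in orphans:` loop; state = (communities, comm_tables)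
def aoStep (fingerprints : List (String × List String))
    (st : List (List String) × List (List String)) (sid : String) :
    List (List String) × List (List String) :=
  let fp := fpSet fingerprints sid
  if fp = [] then (st.1 ++ [[sid]], st.2 ++ [fp])
  else
    -- for i, ct in enumerate(comm_tables): overlap = len(fp & ct); keep strict improvements
    let sel := (PySem.List.enumerate st.2).foldl
      (fun (b : Int × Int) p =>
        if ((PySem.Set.inter fp p.2).length : Int) > b.2
        then (p.1, ((PySem.Set.inter fp p.2).length : Int)) else b) (-1, 0)
    if sel.1 ≥ 0 ∧ sel.2 > 0 then
      (PySem.List.pySetD st.1 sel.1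
         (PySem.Set.add (PySem.List.pyGetD st.1 sel.1 []) sid),
       PySem.List.pySetD st.2 sel.1
         (PySem.Set.union (PySem.List.pyGetD st.2 sel.1 []) fp))
    else (st.1 ++ [[sid]], st.2 ++ [fp])

def assign_orphans_py (all_ids : List String) (communities : List (List String)) (fingerprints : List (String × List String)) : List (List String) :=
  let assigned := communities.foldl (fun s c => PySem.Set.update s c) PySem.Set.empty
  let orphans := all_ids.filter (fun sid => !(PySem.Set.contains assigned sid))
  if orphans = [] then communities
  else
    let comm_tables := communities.map (fun comm =>
      comm.foldl (fun t sid => PySem.Set.update t (fpSet fingerprints sid)) PySem.Set.empty)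
    ((orphans.foldl (aoStep fingerprints) (communities, comm_tables)).1).filter
      (fun c => c.length > 0)

-- ===== PORT B =====
-- `for t in tables: index.setdefault(t, set()).add(i)`
def boIdxAdd (idx : PySem.Dict String (List Int)) (tables : List String) (i : Int) :
    PySem.Dict String (List Int) :=
  tables.foldl (fun d t => d.insert t (PySem.Set.add (d.getD t []) i)) idx

-- the initial inverted index: for i in range(n): for sid in communities[i]: add i under each table
def boBuild (communities : List (List String)) (fingerprints : List (String × List String)) :
    PySem.Dict String (List Int) :=
  (PySem.List.pyRange 0 (PySem.List.len communities)).foldl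
    (fun d i => (PySem.List.pyGetD communities i []).foldl
      (fun d sid => boIdxAdd d (fpSet fingerprints sid) i) d)
    PySem.Dict.empty

-- the body of B's `for sid in orphans:` loop; state = (communities, index, n)
def boStep (fingerprints : List (String × List String))
    (st : List (List String) × PySem.Dict String (List Int) × Int) (sid : String) :
    List (List String) × PySem.Dict String (List Int) × Int :=
  let fp := fpSet fingerprints sid
  let sel : Int × Int :=
    if fp = [] then (-1, 0)
    else
      -- counts[i] = counts.get(i, 0) + 1 over i in index.get(t, ()) for t in fp
      let counts := fp.foldl
        (fun c t => ((st.2.1).getD t []).foldl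
          (fun (c : PySem.Dict Int Int) i => c.insert i (c.getD i 0 + 1)) c)
        PySem.Dict.empty
      -- for i in sorted(counts): first strict max = smallest argmax
      (PySem.List.sorted counts.keys id).foldl
        (fun (b : Int × Int) i => if counts.getD i 0 > b.2 then (i, counts.getD i 0) else b)
        (-1, 0)
  if sel.1 ≥ 0 then
    (PySem.List.pySetD st.1 sel.1
       (PySem.Set.add (PySem.List.pyGetD st.1 sel.1 []) sid),
     boIdxAdd st.2.1 fp sel.1, st.2.2)
  else
    (st.1 ++ [[sid]], boIdxAdd st.2.1 fp st.2.2, st.2.2 + 1)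

def assign_orphans_py_alt (all_ids : List String) (communities : List (List String)) (fingerprints : List (String × List String)) : List (List String) :=
  let assigned := PySem.Set.ofList (communities.flatMap (fun c => c))
  let orphans := all_ids.filter (fun sid => !(PySem.Set.contains assigned sid))
  if orphans = [] then communities
  else
    let index := boBuild communities fingerprints
    ((orphans.foldl (boStep fingerprints) (communities, index, PySem.List.len communities)).1).filter
      (fun c => c.length > 0)

-- ===== PRECONDITION & SPEC =====
def Spec_assign_orphans_py (all_ids : List String) (communities : List (List String)) (fingerprints : List (String × List String)) (out : List (List String)) : Prop := out = assign_orphans_py_alt all_ids communities fingerprints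
instance (all_ids : List String) (communities : List (List String)) (fingerprints : List (String × List String)) (out : List (List String)) : Decidable (Spec_assign_orphans_py all_ids communities fingerprints out) := by unfold Spec_assign_orphans_py; infer_instance

-- ===== CLAIM (what is proved, stated in full; the proofs are below) =====
def Claim_equal_assign_orphans_py : Prop := ∀ (all_ids : List String) (communities : List (List String)) (fingerprints : List (String × List String)), Dom_assign_orphans_py all_ids communities fingerprints → Spec_assign_orphans_py all_ids communities fingerprints (assign_orphans_py all_ids communities fingerprints)

-- ===== LEMMAS AND PROOFS =====

-- the overlap of the orphan's fingerprint `fp` with community i's table set, as A computes it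
def ov (fp : List String) (cts : List (List String)) (i : Int) : Int :=
  ((PySem.Set.inter fp (PySem.List.pyGetD cts i [])).length : Int)

-- the invariant tying B's inverted index to A's comm_tables
def IdxInv (idx : PySem.Dict String (List Int)) (cts : List (List String)) : Prop :=
  (∀ t, (idx.getD t []).Nodup) ∧
  (∀ t (i : Int), i ∈ idx.getD t [] ↔
    0 ≤ i ∧ i < (cts.length : Int) ∧ t ∈ PySem.List.pyGetD cts i [])

-- membership in A's `assigned` accumulator
theorem mem_foldl_update (cs : List (List String)) (s0 : List String) (y : String) :
    y ∈ cs.foldl (fun s c => PySem.Set.update s c) s0 ↔ y ∈ s0 ∨ ∃ c ∈ cs, y ∈ c := by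
  induction cs generalizing s0 with
  | nil => simp
  | cons c cs ih =>
    rw [List.foldl_cons, ih, PySem.Set.mem_update]
    simp only [List.mem_cons]
    aesop

-- both ports compute the same orphan list
theorem orphans_eq (all_ids : List String) (communities : List (List String)) :
    all_ids.filter (fun sid => !(PySem.Set.contains
        (communities.foldl (fun s c => PySem.Set.update s c) PySem.Set.empty) sid))
    = all_ids.filter (fun sid => !(PySem.Set.contains
        (PySem.Set.ofList (communities.flatMap (fun c => c))) sid)) := by
  apply List.filter_congr
  intro sid _
  have h : PySem.Set.contains
        (communities.foldl (fun s c => PySem.Set.update s c) PySem.Set.empty) sid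
      = PySem.Set.contains (PySem.Set.ofList (communities.flatMap (fun c => c))) sid := by
    rw [Bool.eq_iff_iff, PySem.Set.contains_iff, PySem.Set.contains_iff,
        mem_foldl_update, PySem.Set.mem_ofList, List.mem_flatMap]
    simp [PySem.Set.empty]
  rw [h]

theorem nodup_boIdxAdd (idx : PySem.Dict String (List Int)) (ts : List String) (i0 : Int)
    (h : ∀ t, (idx.getD t []).Nodup) (t : String) :
    ((boIdxAdd idx ts i0).getD t []).Nodup := by
  induction ts generalizing idx with
  | nil => exact h t
  | cons t' ts ih =>
    have hstep : boIdxAdd idx (t' :: ts) i0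
        = boIdxAdd (idx.insert t' (PySem.Set.add (idx.getD t' []) i0)) ts i0 := rfl
    rw [hstep]
    refine ih _ (fun u => ?_)
    rw [PySem.Dict.getD_insert]
    split
    · exact PySem.Set.nodup_add _ _ (h t')
    · exact h u

theorem mem_boIdxAdd (idx : PySem.Dict String (List Int)) (ts : List String) (i0 : Int)
    (t : String) (i : Int) :
    i ∈ (boIdxAdd idx ts i0).getD t [] ↔ i ∈ idx.getD t [] ∨ (t ∈ ts ∧ i = i0) := by
  induction ts generalizing idx with
  | nil => simp [boIdxAdd]
  | cons t' ts ih =>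
    have hstep : boIdxAdd idx (t' :: ts) i0
        = boIdxAdd (idx.insert t' (PySem.Set.add (idx.getD t' []) i0)) ts i0 := rfl
    rw [hstep, ih, PySem.Dict.getD_insert]
    by_cases h2 : t = t'
    · subst h2; simp [PySem.Set.mem_add]; try tauto
    · simp [h2]; try tauto

-- membership after indexing one community
theorem mem_boIdxComm (fps : List (String × List String)) (comm : List String)
    (j : Int) (d : PySem.Dict String (List Int)) (t : String) (i : Int) :
    i ∈ (comm.foldl (fun d sid => boIdxAdd d (fpSet fps sid) j) d).getD t []
      ↔ i ∈ d.getD t [] ∨ (i = j ∧ ∃ sid ∈ comm, t ∈ fpSet fps sid) := by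
  induction comm generalizing d with
  | nil => simp
  | cons sid comm ih =>
    rw [List.foldl_cons, ih, mem_boIdxAdd]
    simp only [List.mem_cons]
    constructor
    · rintro ((h | ⟨h1, h2⟩) | ⟨h1, s, hs, h2⟩)
      · exact Or.inl h
      · exact Or.inr ⟨h2, sid, Or.inl rfl, h1⟩
      · exact Or.inr ⟨h1, s, Or.inr hs, h2⟩
    · rintro (h | ⟨h1, s, (rfl | hs), h2⟩)
      · exact Or.inl (Or.inl h)
      · exact Or.inl (Or.inr ⟨h2, h1⟩)
      · exact Or.inr ⟨h1, s, hs, h2⟩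

theorem nodup_boIdxComm (fps : List (String × List String)) (comm : List String)
    (j : Int) (d : PySem.Dict String (List Int))
    (h : ∀ t, (d.getD t []).Nodup) (t : String) :
    ((comm.foldl (fun d sid => boIdxAdd d (fpSet fps sid) j) d).getD t []).Nodup := by
  induction comm generalizing d with
  | nil => exact h t
  | cons sid comm ih =>
    rw [List.foldl_cons]
    exact ih _ (fun u => nodup_boIdxAdd _ _ _ h u)

-- membership in one cell of A's initial comm_tables
theorem mem_tables_cell (fps : List (String × List String)) (comm : List String)
    (s0 : List String) (t : String) :
    t ∈ comm.foldl (fun s sid => PySem.Set.update s (fpSet fps sid)) s0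
      ↔ t ∈ s0 ∨ ∃ sid ∈ comm, t ∈ fpSet fps sid := by
  induction comm generalizing s0 with
  | nil => simp
  | cons sid comm ih =>
    rw [List.foldl_cons, ih, PySem.Set.mem_update]
    simp only [List.mem_cons]
    constructor
    · rintro ((h | h) | ⟨s, hs, h⟩)
      · exact Or.inl h
      · exact Or.inr ⟨sid, Or.inl rfl, h⟩
      · exact Or.inr ⟨s, Or.inr hs, h⟩
    · rintro (h | ⟨s, (rfl | hs), h⟩)
      · exact Or.inl (Or.inl h)
      · exact Or.inl (Or.inr h)
      · exact Or.inr ⟨s, hs, h⟩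

-- membership in B's whole initial index
theorem mem_boBuildAux (communities : List (List String)) (fps : List (String × List String))
    (l : List Int) (d : PySem.Dict String (List Int)) (t : String) (i : Int) :
    i ∈ (l.foldl (fun d j => (PySem.List.pyGetD communities j []).foldl
          (fun d sid => boIdxAdd d (fpSet fps sid) j) d) d).getD t []
      ↔ i ∈ d.getD t []
        ∨ ∃ j ∈ l, i = j ∧ ∃ sid ∈ PySem.List.pyGetD communities j [], t ∈ fpSet fps sid := by
  induction l generalizing d with
  | nil => simp
  | cons j l ih =>
    rw [List.foldl_cons, ih, mem_boIdxComm]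
    simp only [List.mem_cons]
    constructor
    · rintro ((h | ⟨rfl, h⟩) | ⟨j', hj', h⟩)
      · exact Or.inl h
      · exact Or.inr ⟨i, Or.inl rfl, rfl, h⟩
      · exact Or.inr ⟨j', Or.inr hj', h⟩
    · rintro (h | ⟨j', (rfl | hj'), h⟩)
      · exact Or.inl (Or.inl h)
      · exact Or.inl (Or.inr ⟨h.1, h.2⟩)
      · exact Or.inr ⟨j', hj', h⟩

theorem nodup_boBuildAux (communities : List (List String)) (fps : List (String × List String))
    (l : List Int) (d : PySem.Dict String (List Int))
    (h : ∀ t, (d.getD t []).Nodup) (t : String) :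
    ((l.foldl (fun d j => (PySem.List.pyGetD communities j []).foldl
        (fun d sid => boIdxAdd d (fpSet fps sid) j) d) d).getD t []).Nodup := by
  induction l generalizing d with
  | nil => exact h t
  | cons j l ih =>
    rw [List.foldl_cons]
    exact ih _ (fun u => nodup_boIdxComm _ _ _ _ h u)

-- the initial invariant
theorem inv_init (communities : List (List String)) (fps : List (String × List String)) :
    IdxInv (boBuild communities fps)
      (communities.map (fun comm =>
        comm.foldl (fun t sid => PySem.Set.update t (fpSet fps sid)) PySem.Set.empty)) := by
  constructor
  · intro t
    exact nodup_boBuildAux communities fps _ _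
      (fun u => by rw [PySem.Dict.getD_empty]; exact List.nodup_nil) t
  · intro t i
    unfold boBuild
    rw [mem_boBuildAux]
    rw [PySem.Dict.getD_empty]
    simp only [List.not_mem_nil, false_or]
    have hget : ∀ j : Int,
        PySem.List.pyGetD (communities.map (fun comm =>
          comm.foldl (fun t sid => PySem.Set.update t (fpSet fps sid)) PySem.Set.empty)) j []
        = (PySem.List.pyGetD communities j []).foldl
            (fun t sid => PySem.Set.update t (fpSet fps sid)) PySem.Set.empty := by
      intro j
      exact PySem.List.pyGetD_map
        (fun comm => comm.foldl (fun t sid => PySem.Set.update t (fpSet fps sid)) PySem.Set.empty)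
        communities j []
    constructor
    · rintro ⟨j, hj, rfl, sid, hsid, h⟩
      obtain ⟨h0, hN⟩ := PySem.List.mem_pyRange_one.mp hj
      rw [PySem.List.len] at hN
      refine ⟨h0, by simpa using hN, ?_⟩
      rw [hget i, mem_tables_cell]
      exact Or.inr ⟨sid, hsid, h⟩
    · rintro ⟨h0, hN, h⟩
      rw [hget i, mem_tables_cell] at h
      rcases h with h | ⟨sid, hsid, h⟩
      · simp [PySem.Set.empty] at h
      · refine ⟨i, ?_, rfl, sid, hsid, h⟩
        rw [PySem.List.mem_pyRange_one, PySem.List.len]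
        simp at hN
        omega

-- zero-overlap candidates never affect the selection fold
theorem sel_skip_zero (f : Int → Int) (l : List Int) (b : Int × Int) (hb : 0 ≤ b.2) :
    l.foldl (fun b i => if f i > b.2 then (i, f i) else b) b
      = (l.filter (fun i => decide (0 < f i))).foldl
          (fun b i => if f i > b.2 then (i, f i) else b) b := by
  induction l generalizing b with
  | nil => simp
  | cons i l ih =>
    rw [List.foldl_cons]
    by_cases h : 0 < f i
    · have hf : List.filter (fun i => decide (0 < f i)) (i :: l)
          = i :: List.filter (fun i => decide (0 < f i)) l := by simp [h]
      rw [hf, List.foldl_cons]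
      by_cases h2 : f i > b.2
      · rw [if_pos h2]; exact ih _ (le_of_lt h)
      · rw [if_neg h2]; exact ih _ hb
    · have h2 : ¬ (f i > b.2) := by omega
      have hf : List.filter (fun i => decide (0 < f i)) (i :: l)
          = List.filter (fun i => decide (0 < f i)) l := by simp [h]
      rw [hf, if_neg h2]
      exact ih _ hb

-- the selection fold either stays (-1, 0) or lands on an in-range index with positive overlap
theorem sel_shape (f : Int → Int) (N : Int) :
    ∀ (l : List Int) (b : Int × Int), (∀ i ∈ l, 0 ≤ i ∧ i < N) →
    (b = (-1, 0) ∨ (0 ≤ b.1 ∧ b.1 < N ∧ 0 < b.2)) →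
    (l.foldl (fun b i => if f i > b.2 then (i, f i) else b) b) = (-1, 0)
      ∨ (0 ≤ (l.foldl (fun b i => if f i > b.2 then (i, f i) else b) b).1
         ∧ (l.foldl (fun b i => if f i > b.2 then (i, f i) else b) b).1 < N
         ∧ 0 < (l.foldl (fun b i => if f i > b.2 then (i, f i) else b) b).2) := by
  intro l
  induction l with
  | nil => intro b _ hb; simpa using hb
  | cons i l ih =>
    intro b hl hb
    have hi := hl i (by simp)
    have hb2 : 0 ≤ b.2 := by
      rcases hb with h | h
      · simp [h]
      · omega
    rw [List.foldl_cons]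
    by_cases h2 : f i > b.2
    · rw [if_pos h2]
      exact ih _ (fun j hj => hl j (by simp [hj]))
        (Or.inr ⟨hi.1, hi.2, by omega⟩)
    · rw [if_neg h2]
      exact ih _ (fun j hj => hl j (by simp [hj])) hb

-- a nested counting fold is the counting fold of the flattened list
theorem counts_flatten (fp : List String) (idx : PySem.Dict String (List Int))
    (c0 : PySem.Dict Int Int) :
    fp.foldl (fun c t => (idx.getD t []).foldl
        (fun (c : PySem.Dict Int Int) i => c.insert i (c.getD i 0 + 1)) c) c0
    = (fp.flatMap (fun t => idx.getD t [])).foldl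
        (fun (c : PySem.Dict Int Int) i => c.insert i (c.getD i 0 + 1)) c0 := by
  induction fp generalizing c0 with
  | nil => simp
  | cons t fp ih => rw [List.foldl_cons, ih, List.flatMap_cons, List.foldl_append]

-- counting occurrences in the flattened index lists = counting matching tables
theorem count_flatMap_eq_countP (fp : List String) (g : String → List Int)
    (hg : ∀ t ∈ fp, (g t).Nodup) (i : Int) :
    (fp.flatMap g).count i = fp.countP (fun t => decide (i ∈ g t)) := by
  induction fp with
  | nil => simp
  | cons t fp ih =>
    have hrest : ∀ u ∈ fp, (g u).Nodup := fun u hu => hg u (by simp [hu])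
    rw [List.flatMap_cons, List.count_append, List.countP_cons, ih hrest]
    by_cases h : i ∈ g t
    · rw [List.count_eq_one_of_mem (hg t (by simp)) h]; simp [h]; omega
    · rw [List.count_eq_zero_of_not_mem h]; simp [h]

-- under the invariant, B's count for an in-range i is A's overlap
theorem countP_eq_ov (fp : List String) (idx : PySem.Dict String (List Int))
    (cts : List (List String)) (hinv : IdxInv idx cts) (i : Int)
    (h0 : 0 ≤ i) (hN : i < (cts.length : Int)) :
    (fp.countP (fun t => decide (i ∈ idx.getD t [])) : Int) = ov fp cts i := by
  unfold ov PySem.Set.inter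
  rw [← List.countP_eq_length_filter]
  have h1 : ∀ t ∈ fp, (decide (i ∈ idx.getD t []) = true)
      ↔ (PySem.Set.contains (PySem.List.pyGetD cts i []) t = true) := by
    intro t _
    rw [PySem.Set.contains_iff, decide_eq_true_iff, hinv.2 t i]
    constructor
    · rintro ⟨_, _, h⟩; exact h
    · intro h; exact ⟨h0, hN, h⟩
  exact_mod_cast congrArg Nat.cast (List.countP_congr h1)

-- 0 < ov means some fingerprint table lies in the community's table set
theorem ov_pos_iff (fp : List String) (cts : List (List String)) (i : Int) :
    0 < ov fp cts i ↔ ∃ t ∈ fp, t ∈ PySem.List.pyGetD cts i [] := by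
  unfold ov PySem.Set.inter
  rw [← List.countP_eq_length_filter]
  simp [List.countP_pos_iff]


-- B's sorted candidate list is exactly the positive-overlap part of A's scan order
theorem sorted_keys_eq (fp : List String) (idx : PySem.Dict String (List Int))
    (cts : List (List String)) (hinv : IdxInv idx cts) :
    PySem.List.sorted
      (PySem.Dict.keys (fp.foldl (fun c t => (idx.getD t []).foldl
        (fun (c : PySem.Dict Int Int) i => c.insert i (c.getD i 0 + 1)) c) PySem.Dict.empty))
      id
    = (PySem.List.pyRange 0 (cts.length : Int)).filter
        (fun i => decide (0 < ov fp cts i)) := by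
  have hkeys : (fp.foldl (fun c t => (idx.getD t []).foldl
        (fun (c : PySem.Dict Int Int) i => c.insert i (c.getD i 0 + 1)) c) PySem.Dict.empty).keys
      = PySem.Set.ofList (fp.flatMap (fun t => idx.getD t [])) := by
    rw [counts_flatten,
        PySem.Dict.keys_foldl_insert (fp.flatMap (fun t => idx.getD t []))
          (fun d x => d.getD x 0 + 1) PySem.Dict.empty,
        PySem.Dict.keys_empty, PySem.Set.update_nil_left]
  rw [hkeys]
  apply PySem.List.sorted_eq_of_perm_of_pairwise_lt
  · rw [List.perm_ext_iff_of_nodup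
      (List.Nodup.filter _ (PySem.List.nodup_pyRange_one 0 _)) (PySem.Set.nodup_ofList _)]
    intro a
    rw [List.mem_filter, PySem.List.mem_pyRange_one, PySem.Set.mem_ofList, List.mem_flatMap,
        decide_eq_true_iff, ov_pos_iff]
    constructor
    · rintro ⟨⟨h0, hN⟩, t, htfp, htc⟩
      exact ⟨t, htfp, (hinv.2 t a).mpr ⟨h0, hN, htc⟩⟩
    · rintro ⟨t, htfp, hidx⟩
      obtain ⟨h0, hN, htc⟩ := (hinv.2 t a).mp hidx
      exact ⟨⟨h0, hN⟩, t, htfp, htc⟩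
  · exact List.Pairwise.sublist List.filter_sublist (PySem.List.pairwise_lt_pyRange_one 0 _)

-- B's counter value at an in-range index is A's overlap
theorem counts_getD_eq_ov (fp : List String) (idx : PySem.Dict String (List Int))
    (cts : List (List String)) (hinv : IdxInv idx cts) (i : Int)
    (h0 : 0 ≤ i) (hN : i < (cts.length : Int)) :
    (fp.foldl (fun c t => (idx.getD t []).foldl
        (fun (c : PySem.Dict Int Int) i => c.insert i (c.getD i 0 + 1)) c)
        PySem.Dict.empty).getD i 0 = ov fp cts i := by
  rw [counts_flatten, PySem.Dict.getD_foldl_insert_add_one, PySem.Dict.getD_empty,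
      count_flatMap_eq_countP fp _ (fun t _ => hinv.1 t) i, zero_add]
  exact countP_eq_ov fp idx cts hinv i h0 hN

-- A's enumerate scan as a fold over the index range
theorem enum_fold_eq_range_fold (fp : List String) (cts : List (List String)) :
    (PySem.List.enumerate cts).foldl
      (fun (b : Int × Int) p =>
        if ((PySem.Set.inter fp p.2).length : Int) > b.2
        then (p.1, ((PySem.Set.inter fp p.2).length : Int)) else b) (-1, 0)
    = (PySem.List.pyRange 0 (cts.length : Int)).foldl
        (fun (b : Int × Int) i => if ov fp cts i > b.2 then (i, ov fp cts i) else b) (-1, 0) := by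
  rw [PySem.List.enumerate_eq_map_pyRange cts [], List.foldl_map]
  rfl

-- the two selection computations agree
theorem sel_eq (fp : List String) (idx : PySem.Dict String (List Int))
    (cts : List (List String)) (hinv : IdxInv idx cts) :
    ((PySem.List.sorted
        (PySem.Dict.keys (fp.foldl (fun c t => (idx.getD t []).foldl
          (fun (c : PySem.Dict Int Int) i => c.insert i (c.getD i 0 + 1)) c) PySem.Dict.empty))
        id).foldl
      (fun (b : Int × Int) i =>
        if (fp.foldl (fun c t => (idx.getD t []).foldl
              (fun (c : PySem.Dict Int Int) i => c.insert i (c.getD i 0 + 1)) c)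
              PySem.Dict.empty).getD i 0 > b.2
        then (i, (fp.foldl (fun c t => (idx.getD t []).foldl
              (fun (c : PySem.Dict Int Int) i => c.insert i (c.getD i 0 + 1)) c)
              PySem.Dict.empty).getD i 0) else b) (-1, 0))
    = (PySem.List.pyRange 0 (cts.length : Int)).foldl
        (fun (b : Int × Int) i => if ov fp cts i > b.2 then (i, ov fp cts i) else b) (-1, 0) := by
  rw [sorted_keys_eq fp idx cts hinv]
  rw [PySem.List.foldl_congr_mem _ _
      (fun (b : Int × Int) i => if ov fp cts i > b.2 then (i, ov fp cts i) else b) _ ?hc]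
  case hc =>
    intro acc x hx
    obtain ⟨hxr, _⟩ := List.mem_filter.mp hx
    obtain ⟨h0, hN⟩ := PySem.List.mem_pyRange_one.mp hxr
    rw [counts_getD_eq_ov fp idx cts hinv x h0 hN]
  exact (sel_skip_zero (ov fp cts) _ (-1, 0) (by simp)).symm

-- pyGetD through an append, below and at the split
theorem pyGetD_append_lt {α : Type} (xs ys : List α) (i : Int) (d : α)
    (h0 : 0 ≤ i) (h : i < (xs.length : Int)) :
    PySem.List.pyGetD (xs ++ ys) i d = PySem.List.pyGetD xs i d := by
  rw [PySem.List.pyGetD_eq_getElem (xs ++ ys) d h0 (by simp; omega),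
      PySem.List.pyGetD_eq_getElem xs d h0 h]
  exact List.getElem_append_left (by omega)

theorem pyGetD_append_self {α : Type} (xs : List α) (y : α) (d : α) :
    PySem.List.pyGetD (xs ++ [y]) (xs.length : Int) d = y := by
  rw [PySem.List.pyGetD_natCast]
  simp

-- appending a fresh community preserves the invariant
theorem inv_append (idx : PySem.Dict String (List Int)) (cts : List (List String))
    (hinv : IdxInv idx cts) (fp : List String) :
    IdxInv (boIdxAdd idx fp (cts.length : Int)) (cts ++ [fp]) := by
  obtain ⟨hnd, hmem⟩ := hinv
  constructor
  · intro t; exact nodup_boIdxAdd _ _ _ hnd t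
  · intro t i
    rw [mem_boIdxAdd, hmem]
    constructor
    · rintro (⟨h0, hN, hct⟩ | ⟨htfp, rfl⟩)
      · refine ⟨h0, by rw [List.length_append, List.length_singleton]; push_cast; omega, ?_⟩
        rw [pyGetD_append_lt _ _ _ _ h0 hN]; exact hct
      · refine ⟨Int.natCast_nonneg _, by rw [List.length_append, List.length_singleton]; push_cast; omega, ?_⟩
        rw [pyGetD_append_self]; exact htfp
    · rintro ⟨h0, hN, hct⟩
      by_cases hi : i < (cts.length : Int)
      · exact Or.inl ⟨h0, hi, by rwa [pyGetD_append_lt _ _ _ _ h0 hi] at hct⟩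
      · right
        have he : i = (cts.length : Int) := by simp at hN; omega
        subst he
        rw [pyGetD_append_self] at hct
        exact ⟨hct, rfl⟩

-- assigning the orphan to community bi preserves the invariant
theorem inv_assign (idx : PySem.Dict String (List Int)) (cts : List (List String))
    (hinv : IdxInv idx cts) (fp : List String) (bi : Int)
    (h0 : 0 ≤ bi) (hN : bi < (cts.length : Int)) :
    IdxInv (boIdxAdd idx fp bi)
      (PySem.List.pySetD cts bi
        (PySem.Set.union (PySem.List.pyGetD cts bi []) fp)) := by
  obtain ⟨hnd, hmem⟩ := hinv
  have hlt : bi.toNat < cts.length := by omega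
  have key : ∀ i : Int, 0 ≤ i →
      PySem.List.pyGetD (PySem.List.pySetD cts bi
          (PySem.Set.union (PySem.List.pyGetD cts bi []) fp)) i []
        = if i = bi then PySem.Set.union (PySem.List.pyGetD cts bi []) fp
          else PySem.List.pyGetD cts i [] := by
    intro i h0i
    conv_lhs => rw [show bi = ((bi.toNat : Nat) : Int) from (Int.toNat_of_nonneg h0).symm,
                    show i = ((i.toNat : Nat) : Int) from (Int.toNat_of_nonneg h0i).symm]
    rw [PySem.List.pyGetD_pySetD_natCast _ _ _ _ _ hlt]
    by_cases he : i = bi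
    · have : i.toNat = bi.toNat := by omega
      rw [if_pos this, if_pos he, Int.toNat_of_nonneg h0]
    · have : ¬ (i.toNat = bi.toNat) := by omega
      rw [if_neg this, if_neg he, Int.toNat_of_nonneg h0i]
  constructor
  · intro t; exact nodup_boIdxAdd _ _ _ hnd t
  · intro t i
    rw [mem_boIdxAdd, hmem, PySem.List.length_pySetD]
    constructor
    · rintro (⟨h0i, hNi, hct⟩ | ⟨htfp, rfl⟩)
      · refine ⟨h0i, hNi, ?_⟩
        rw [key i h0i]
        by_cases he : i = bi
        · subst he
          rw [if_pos rfl]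
          exact (PySem.Set.mem_union _ _ _).mpr (Or.inl hct)
        · rw [if_neg he]; exact hct
      · refine ⟨h0, hN, ?_⟩
        rw [key _ h0, if_pos rfl]
        exact (PySem.Set.mem_union _ _ _).mpr (Or.inr htfp)
    · rintro ⟨h0i, hNi, hct⟩
      rw [key i h0i] at hct
      by_cases he : i = bi
      · subst he
        rw [if_pos rfl] at hct
        rcases (PySem.Set.mem_union _ _ _).mp hct with h | h
        · exact Or.inl ⟨h0i, hNi, h⟩
        · exact Or.inr ⟨h, rfl⟩
      · rw [if_neg he] at hct
        exact Or.inl ⟨h0i, hNi, hct⟩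

-- one loop iteration preserves agreement and the invariant
theorem step_agree (fps : List (String × List String)) (sid : String)
    (comms cts : List (List String)) (idx : PySem.Dict String (List Int))
    (hinv : IdxInv idx cts) (hlen : comms.length = cts.length) :
    (aoStep fps (comms, cts) sid).1 = (boStep fps (comms, idx, (cts.length : Int)) sid).1
    ∧ IdxInv (boStep fps (comms, idx, (cts.length : Int)) sid).2.1 (aoStep fps (comms, cts) sid).2
    ∧ (boStep fps (comms, idx, (cts.length : Int)) sid).2.2
        = ((aoStep fps (comms, cts) sid).2.length : Int)
    ∧ (aoStep fps (comms, cts) sid).1.length = (aoStep fps (comms, cts) sid).2.length := by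
  simp only [aoStep, boStep]
  by_cases hfp : fpSet fps sid = []
  · simp only [if_pos hfp]
    have hneg : ¬ (((-1 : Int), (0 : Int)).1 ≥ 0) := by norm_num
    rw [if_neg hneg]
    refine ⟨rfl, inv_append idx cts hinv _, ?_, ?_⟩
    · rw [List.length_append, List.length_singleton]; push_cast; omega
    · simp [hlen]
  · simp only [if_neg hfp]
    rw [sel_eq (fpSet fps sid) idx cts hinv, enum_fold_eq_range_fold (fpSet fps sid) cts]
    have hsh := sel_shape (ov (fpSet fps sid) cts) (cts.length : Int)
      (PySem.List.pyRange 0 (cts.length : Int)) (-1, 0)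
      (fun i hi => PySem.List.mem_pyRange_one.mp hi) (Or.inl rfl)
    rcases hsh with hS0 | ⟨hp0, hpN, hpv⟩
    · rw [hS0]
      have hneg : ¬ (((-1 : Int), (0 : Int)).1 ≥ 0) := by norm_num
      have hneg2 : ¬ ((((-1 : Int), (0 : Int)).1 ≥ 0) ∧ (((-1 : Int), (0 : Int)).2 > 0)) := by
        norm_num
      rw [if_neg hneg, if_neg hneg2]
      refine ⟨rfl, inv_append idx cts hinv _, ?_, ?_⟩
      · rw [List.length_append, List.length_singleton]; push_cast; omega
      · simp [hlen]
    · rw [if_pos (by omega : ((PySem.List.pyRange 0 (cts.length : Int)).foldl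
          (fun (b : Int × Int) i => if ov (fpSet fps sid) cts i > b.2
            then (i, ov (fpSet fps sid) cts i) else b) (-1, 0)).1 ≥ 0),
          if_pos (⟨by omega, hpv⟩ : _ ∧ _)]
      refine ⟨rfl, inv_assign idx cts hinv _ _ hp0 hpN, ?_, ?_⟩
      · rw [PySem.List.length_pySetD]
      · rw [PySem.List.length_pySetD, PySem.List.length_pySetD, hlen]

-- the whole loops agree
theorem loop_agree (fps : List (String × List String)) (orphans : List String) :
    ∀ (comms cts : List (List String)) (idx : PySem.Dict String (List Int)),
    IdxInv idx cts → comms.length = cts.length →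
    (orphans.foldl (aoStep fps) (comms, cts)).1
      = (orphans.foldl (boStep fps) (comms, idx, (cts.length : Int))).1 := by
  induction orphans with
  | nil => intro comms cts idx _ _; rfl
  | cons sid rest ih =>
    intro comms cts idx hinv hlen
    rw [List.foldl_cons, List.foldl_cons]
    obtain ⟨h1, h2, h3, h4⟩ := step_agree fps sid comms cts idx hinv hlen
    have hB : boStep fps (comms, idx, (cts.length : Int)) sid
        = ((aoStep fps (comms, cts) sid).1,
           (boStep fps (comms, idx, (cts.length : Int)) sid).2.1,
           ((aoStep fps (comms, cts) sid).2.length : Int)) := by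
      rw [Prod.ext_iff, Prod.ext_iff]
      exact ⟨h1.symm, rfl, h3⟩
    rw [hB]
    exact ih _ _ _ h2 h4

-- ===== VERDICT (by name: the statement is the Claim_ definition above) =====
theorem assign_orphans_py_spec : Claim_equal_assign_orphans_py := by
  intro all_ids communities fingerprints _
  simp only [Spec_assign_orphans_py, assign_orphans_py, assign_orphans_py_alt]
  rw [orphans_eq]
  by_cases h : all_ids.filter (fun sid => !(PySem.Set.contains
      (PySem.Set.ofList (communities.flatMap (fun c => c))) sid)) = []
  · rw [h]; simp
  · rw [if_neg h, if_neg h]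
    have hlen : communities.length
        = (communities.map (fun comm =>
            comm.foldl (fun t sid => PySem.Set.update t (fpSet fingerprints sid))
              PySem.Set.empty)).length := by simp
    have hmain := loop_agree fingerprints
      (all_ids.filter (fun sid => !(PySem.Set.contains
        (PySem.Set.ofList (communities.flatMap (fun c => c))) sid)))
      communities
      (communities.map (fun comm =>
        comm.foldl (fun t sid => PySem.Set.update t (fpSet fingerprints sid))
          PySem.Set.empty))
      (boBuild communities fingerprints) (inv_init communities fingerprints) hlen
    have hcast : ((communities.map (fun comm =>
        comm.foldl (fun t sid => PySem.Set.update t (fpSet fingerprints sid))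
          PySem.Set.empty)).length : Int) = PySem.List.len communities := by
      rw [PySem.List.len]; simp
    rw [hcast] at hmain
    rw [hmain]
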